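-- pv_equiv track=rewrite | github.com/PaulBC/grid-sat-solver | permutations.py | find_closure
-- ===== SOURCE A (Python) =====
-- def find_closure(basis, labeling):
--   all_labelings = set([tuple(labeling)])
--   size_was = 0
--   inverses = [{v: k for k, v in permutation.items()} for permutation in basis]
--   while size_was < len(all_labelings):
--     size_was = len(all_labelings)
--     for labeling in list(all_labelings):
--       for mapping in inverses:
--         new_labeling = []
--         for from_symbol, to_symbol in labeling:
--           new_labeling.append((mapping.get(from_symbol, from_symbol), to_symbol))
--         all_labelings.add(tuple(new_labeling))
--   return sorted(all_labelings)
-- ===== SOURCE B (Python) =====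
-- def find_closure(basis, labeling):
--   seconds = [t for _, t in labeling]
--   inverses = [{v: k for k, v in p.items()} for p in basis]
--   start = tuple(f for f, _ in labeling)
--   seen = {start}
--   frontier = [start]
--   while frontier:
--     nxt = []
--     for vec in frontier:
--       for m in inverses:
--         w = tuple(m.get(f, f) for f in vec)
--         if w not in seen:
--           seen.add(w)
--           nxt.append(w)
--     frontier = nxt
--   return sorted(tuple(zip(vec, seconds)) for vec in seen)
-- ===== Notes on version B (the rewrite author's own statement) =====
-- stated objective: alternative
-- what changed: A rescans the whole labeling set round after round until a full pass adds nothing; B strips the constant second components, runs a breadth-first frontier search over the first-symbol vectors expanding each vector exactly once, and zips the seconds back on before sorting.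
import Mathlib
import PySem

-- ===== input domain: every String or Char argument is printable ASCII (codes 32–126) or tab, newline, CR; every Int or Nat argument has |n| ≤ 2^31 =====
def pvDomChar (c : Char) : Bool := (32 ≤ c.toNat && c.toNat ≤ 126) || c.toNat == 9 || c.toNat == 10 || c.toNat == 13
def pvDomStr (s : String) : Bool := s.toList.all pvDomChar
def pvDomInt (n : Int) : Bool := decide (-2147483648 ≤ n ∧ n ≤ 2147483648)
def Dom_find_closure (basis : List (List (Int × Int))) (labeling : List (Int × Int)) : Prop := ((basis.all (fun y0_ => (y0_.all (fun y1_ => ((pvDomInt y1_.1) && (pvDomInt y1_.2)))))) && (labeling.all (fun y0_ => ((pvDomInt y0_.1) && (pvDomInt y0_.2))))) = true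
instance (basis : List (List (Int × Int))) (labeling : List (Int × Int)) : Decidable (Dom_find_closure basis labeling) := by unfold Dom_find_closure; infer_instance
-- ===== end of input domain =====

-- B replaces A's repeat-until-no-growth rescans of the labeling set by a breadth-first frontier
-- search over the vectors of first symbols (the constant second components are stripped and
-- zipped back on at the end), expanding each vector once (objective: alternative); both return
-- the sorted closure of the labeling under the inverse mappings, proved equal for all inputs.


-- ===== PORT A =====
-- Each basis element is a Python dict delivered as its item list; rebuild that dict (insert in
-- order, a later value for a repeated key overwrites in place, exactly Python's dict(pairs)) and
-- invert it as the comprehension `{v: k for k, v in permutation.items()}` does.  Both sources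
-- contain this identical line, hence the helper is shared by both ports.
def pvInvert (permutation : List (Int × Int)) : PySem.Dict Int Int :=
  (permutation.foldl (fun d kv => d.insert kv.1 kv.2) (PySem.Dict.mk [])).items.foldl
    (fun d kv => d.insert kv.2 kv.1) (PySem.Dict.mk [])

-- All symbols a first component can ever take: the seed's firsts plus every value of every
-- inverse mapping.  Only used to size the totality fuel below (and in the proofs).
def pvSyms (inverses : List (PySem.Dict Int Int)) (labeling : List (Int × Int)) : List Int :=
  (labeling.map Prod.fst ++ inverses.flatMap PySem.Dict.values).dedup

-- Totality guard only (Python's `while` needs none): the loop reaches its fixpoint in at most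
-- |closure| productive rounds and the closure lives inside a universe of
-- (pvSyms …).length ^ labeling.length labelings — proved in the lemma section.
def pvFuel (inverses : List (PySem.Dict Int Int)) (labeling : List (Int × Int)) : Nat :=
  (pvSyms inverses labeling).length ^ labeling.length + 1

-- the inner `for from_symbol, to_symbol in labeling: new_labeling.append(...)` loop
def pvStepA (mapping : PySem.Dict Int Int) (labeling : List (Int × Int)) : List (Int × Int) :=
  labeling.foldl (fun new_labeling ft => new_labeling ++ [(mapping.getD ft.1 ft.1, ft.2)]) []

-- one body of the while loop: `for labeling in list(all_labelings): for mapping in inverses: add`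
-- (iterates the snapshot of the set; the adds go into the evolving set)
def pvPassA (inverses : List (PySem.Dict Int Int)) (s : PySem.Set (List (Int × Int))) :
    PySem.Set (List (Int × Int)) :=
  s.foldl (fun acc labeling =>
    inverses.foldl (fun acc2 mapping => PySem.Set.add acc2 (pvStepA mapping labeling)) acc) s

-- `while size_was < len(all_labelings)` — repeat the pass while the set grew
def pvLoopA (inverses : List (PySem.Dict Int Int)) :
    Nat → PySem.Set (List (Int × Int)) → PySem.Set (List (Int × Int))
  | 0, s => s
  | fuel+1, s =>
    let s' := pvPassA inverses s
    if s.length < s'.length then pvLoopA inverses fuel s' else s'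

-- Python's `sorted` on tuples of int pairs, ported with a flattening key: the blocks have fixed
-- width 2, so lexicographic order on the flattened int lists is exactly Python's tuple order.
def pvKey (l : List (Int × Int)) : List Int := l.foldr (fun ft acc => ft.1 :: ft.2 :: acc) []

def find_closure (basis : List (List (Int × Int))) (labeling : List (Int × Int)) :
    List (List (Int × Int)) :=
  let inverses := basis.map pvInvert
  PySem.List.sorted
    (pvLoopA inverses (pvFuel inverses labeling) (PySem.Set.ofList [labeling])) pvKey

-- ===== PORT B =====
-- `tuple(m.get(f, f) for f in vec)` — one inverse mapping applied to a vector of first symbols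
def altStep (m : PySem.Dict Int Int) (vec : List Int) : List Int :=
  vec.map (fun f => m.getD f f)

-- the two innermost lines: test membership, record a genuinely new vector in seen and nxt
def altPush (vec : List Int) (st : PySem.Set (List Int) × List (List Int))
    (m : PySem.Dict Int Int) : PySem.Set (List Int) × List (List Int) :=
  let w := altStep m vec
  if st.1.contains w then st else (PySem.Set.add st.1 w, st.2 ++ [w])

-- one round of the BFS: expand every vector of the frontier, collecting the next frontier
def altRound (inverses : List (PySem.Dict Int Int)) (frontier : List (List Int))
    (seen : PySem.Set (List Int)) : PySem.Set (List Int) × List (List Int) :=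
  frontier.foldl (fun st vec => inverses.foldl (altPush vec) st) (seen, [])

-- `while frontier:` — level-by-level breadth-first search
def altLoop (inverses : List (PySem.Dict Int Int)) :
    Nat → PySem.Set (List Int) → List (List Int) → PySem.Set (List Int)
  | 0, seen, _ => seen
  | fuel+1, seen, frontier =>
    if frontier.isEmpty then seen
    else
      let st := altRound inverses frontier seen
      altLoop inverses fuel st.1 st.2

-- totality fuel for the BFS, sized by the universe of symbol vectors (see pvFuel)
def altFuel (inverses : List (PySem.Dict Int Int)) (start : List Int) : Nat :=
  ((start ++ inverses.flatMap PySem.Dict.values).dedup).length ^ start.length + 1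

-- sort key for the final `sorted(...)`: flatten each labeling (see the comment at pvKey)
def altKey (l : List (Int × Int)) : List Int := l.flatMap (fun ft => [ft.1, ft.2])

def find_closure_alt (basis : List (List (Int × Int))) (labeling : List (Int × Int)) :
    List (List (Int × Int)) :=
  let seconds := labeling.map (fun ft => ft.2)
  let inverses := basis.map pvInvert
  let start := labeling.map (fun ft => ft.1)
  let seen := altLoop inverses (altFuel inverses start) (PySem.Set.ofList [start]) [start]
  PySem.List.sorted (seen.map (fun vec => vec.zip seconds)) altKey

-- ===== PRECONDITION & SPEC =====
def Spec_find_closure (basis : List (List (Int × Int))) (labeling : List (Int × Int)) (out : List (List (Int × Int))) : Prop := out = find_closure_alt basis labeling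
instance (basis : List (List (Int × Int))) (labeling : List (Int × Int)) (out : List (List (Int × Int))) : Decidable (Spec_find_closure basis labeling out) := by unfold Spec_find_closure; infer_instance

-- ===== CLAIM (what is proved, stated in full; the proofs are below) =====
def Claim_equal_find_closure : Prop := ∀ (basis : List (List (Int × Int))) (labeling : List (Int × Int)), Dom_find_closure basis labeling → Spec_find_closure basis labeling (find_closure basis labeling)

-- ===== LEMMAS AND PROOFS =====

-- proof-side form of A's inner loop: it is a map
def pvStepB (mapping : PySem.Dict Int Int) (current : List (Int × Int)) : List (Int × Int) :=
  current.map (fun ft => (mapping.getD ft.1 ft.1, ft.2))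

theorem pvStepA_eq (mapping : PySem.Dict Int Int) (l : List (Int × Int)) :
    pvStepA mapping l = pvStepB mapping l := by
  simpa [pvStepA, pvStepB] using
    PySem.List.foldl_append_singleton_eq_map
      (fun ft : Int × Int => (mapping.getD ft.1 ft.1, ft.2)) l []

-- labelings reachable from the seed by repeatedly applying an inverse mapping
inductive pvReach (inverses : List (PySem.Dict Int Int)) (seed : List (Int × Int)) :
    List (Int × Int) → Prop
  | seed : pvReach inverses seed seed
  | step {l m} : pvReach inverses seed l → m ∈ inverses →
      pvReach inverses seed (pvStepB m l)

-- symbol vectors reachable from the start vector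
inductive vReach (inverses : List (PySem.Dict Int Int)) (seed : List Int) :
    List Int → Prop
  | seed : vReach inverses seed seed
  | step {v m} : vReach inverses seed v → m ∈ inverses → vReach inverses seed (altStep m v)

-- `pvAddAll s t` = add the elements of t to the set s, in order
def pvAddAll (s : PySem.Set (List (Int × Int))) (t : List (List (Int × Int))) :
    PySem.Set (List (Int × Int)) :=
  t.foldl PySem.Set.add s

theorem mem_pvAddAll (s t : List (List (Int × Int))) (x : List (Int × Int)) :
    x ∈ pvAddAll s t ↔ x ∈ s ∨ x ∈ t := by
  induction t generalizing s with
  | nil => simp [pvAddAll]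
  | cons a t ih =>
    simp only [pvAddAll, List.foldl_cons] at *
    rw [ih]
    simp [PySem.Set.mem_add]
    tauto

theorem nodup_pvAddAll (s t : List (List (Int × Int))) (h : s.Nodup) :
    (pvAddAll s t).Nodup := by
  induction t generalizing s with
  | nil => simpa [pvAddAll]
  | cons a t ih => exact ih _ (PySem.Set.nodup_add s a h)

theorem length_le_pvAddAll (s t : List (List (Int × Int))) :
    s.length ≤ (pvAddAll s t).length := by
  induction t generalizing s with
  | nil => simp [pvAddAll]
  | cons a t ih =>
    refine le_trans ?_ (ih (PySem.Set.add s a))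
    simp only [PySem.Set.add]
    split <;> simp

theorem pvAddAll_eq_of_length (s t : List (List (Int × Int)))
    (h : (pvAddAll s t).length ≤ s.length) : pvAddAll s t = s := by
  induction t generalizing s with
  | nil => simp [pvAddAll]
  | cons a t ih =>
    simp only [pvAddAll, List.foldl_cons] at *
    by_cases hc : PySem.Set.contains s a = true
    · rw [PySem.Set.add, if_pos hc] at *; exact ih s h
    · exfalso
      rw [PySem.Set.add, if_neg hc] at h
      have := length_le_pvAddAll (s ++ [a]) t
      simp only [pvAddAll] at this
      simp at this
      omega

-- a loop that pvAddAll's batches is one pvAddAll of the concatenation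
theorem foldl_pvAddAll (g : List (Int × Int) → List (List (Int × Int)))
    (l : List (List (Int × Int))) (s : PySem.Set (List (Int × Int))) :
    l.foldl (fun acc x => pvAddAll acc (g x)) s = pvAddAll s (l.flatMap g) := by
  induction l generalizing s with
  | nil => simp [pvAddAll]
  | cons a l ih =>
    simp only [List.foldl_cons, List.flatMap_cons]
    have := ih (pvAddAll s (g a))
    simpa [pvAddAll, List.foldl_append] using this

-- one pass of A is one pvAddAll of all successors of the snapshot
theorem pvPassA_eq (inverses : List (PySem.Dict Int Int)) (s : PySem.Set (List (Int × Int))) :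
    pvPassA inverses s =
      pvAddAll s (s.flatMap (fun l => inverses.map (fun m => pvStepB m l))) := by
  have hinner : ∀ (acc : PySem.Set (List (Int × Int))) (l : List (Int × Int)),
      inverses.foldl (fun acc2 m => PySem.Set.add acc2 (pvStepA m l)) acc =
        pvAddAll acc (inverses.map (fun m => pvStepB m l)) := by
    intro acc l
    rw [pvAddAll, List.foldl_map]
    exact PySem.List.foldl_congr_mem _ _ _ _ (fun a m _ => by rw [pvStepA_eq])
  rw [pvPassA, ← foldl_pvAddAll]
  exact PySem.List.foldl_congr_mem _ _ _ _ (fun acc l _ => hinner acc l)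

-- the universe: all labelings with the seed's second components and first components in S
def pvUniv (S : List Int) : List (Int × Int) → List (List (Int × Int))
  | [] => [[]]
  | ft :: rest => (S ×ˢ pvUniv S rest).map (fun p => (p.1, ft.2) :: p.2)

theorem mem_pvUniv (S : List Int) (l x : List (Int × Int)) :
    x ∈ pvUniv S l ↔ List.Forall₂ (fun p q => p.1 ∈ S ∧ p.2 = q.2) x l := by
  induction l generalizing x with
  | nil => cases x <;> simp [pvUniv]
  | cons ft rest ih =>
    cases x with
    | nil => simp [pvUniv]
    | cons y ys =>
      simp only [pvUniv, List.mem_map, List.forall₂_cons]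
      constructor
      · rintro ⟨⟨a, r⟩, hm, heq⟩
        rw [List.mem_product] at hm
        cases heq
        exact ⟨⟨hm.1, rfl⟩, (ih r).mp hm.2⟩
      · rintro ⟨⟨h1, h2⟩, h3⟩
        refine ⟨(y.1, ys), List.mem_product.mpr ⟨h1, (ih ys).mpr h3⟩, ?_⟩
        cases y; simp at h2 ⊢; exact h2.symm

theorem length_pvUniv (S : List Int) (l : List (Int × Int)) :
    (pvUniv S l).length = S.length ^ l.length := by
  induction l with
  | nil => simp [pvUniv]
  | cons ft rest ih => simp [pvUniv, List.length_product, ih, pow_succ]; ring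

-- a looked-up value stays inside the symbol set
theorem getD_mem_pvSyms (inverses : List (PySem.Dict Int Int)) (labeling : List (Int × Int))
    (m : PySem.Dict Int Int) (hm : m ∈ inverses) (f : Int)
    (hf : f ∈ pvSyms inverses labeling) :
    m.getD f f ∈ pvSyms inverses labeling := by
  rw [PySem.Dict.getD]
  cases h : m.get? f with
  | none => simpa using hf
  | some v =>
    simp only [Option.getD_some]
    have hv : v ∈ m.values := by
      simp only [PySem.Dict.get?, Option.map_eq_some_iff] at h
      obtain ⟨p, hp, rfl⟩ := h
      exact List.mem_map.mpr ⟨p, List.mem_of_find?_eq_some hp, rfl⟩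
    rw [pvSyms, List.mem_dedup]
    exact List.mem_append_right _ (List.mem_flatMap.mpr ⟨m, hm, hv⟩)

-- the universe is closed under every inverse mapping
theorem step_mem_pvUniv (inverses : List (PySem.Dict Int Int)) (labeling : List (Int × Int))
    (m : PySem.Dict Int Int) (hm : m ∈ inverses) (x : List (Int × Int))
    (hx : x ∈ pvUniv (pvSyms inverses labeling) labeling) :
    pvStepB m x ∈ pvUniv (pvSyms inverses labeling) labeling := by
  rw [mem_pvUniv] at hx ⊢
  rw [pvStepB, List.forall₂_map_left_iff]
  exact hx.imp (by
    rintro p q ⟨h1, h2⟩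
    exact ⟨getD_mem_pvSyms inverses labeling m hm p.1 h1, h2⟩)

theorem forall₂_self_of_firsts (S : List Int) :
    ∀ (l : List (Int × Int)), (∀ ft ∈ l, ft.1 ∈ S) →
      List.Forall₂ (fun p q : Int × Int => p.1 ∈ S ∧ p.2 = q.2) l l := by
  intro l h
  induction l with
  | nil => simp
  | cons ft rest ih =>
    exact List.forall₂_cons.mpr
      ⟨⟨h ft (by simp), rfl⟩, ih (fun x hx => h x (by simp [hx]))⟩

theorem seed_mem_pvUniv (inverses : List (PySem.Dict Int Int)) (labeling : List (Int × Int)) :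
    labeling ∈ pvUniv (pvSyms inverses labeling) labeling := by
  rw [mem_pvUniv]
  refine forall₂_self_of_firsts _ labeling (fun ft hft => ?_)
  rw [pvSyms, List.mem_dedup]
  exact List.mem_append_left _ (List.mem_map.mpr ⟨ft, hft, rfl⟩)

-- size bound: a nodup subset of the universe is no longer than it
theorem length_le_of_subset_univ (s : List (List (Int × Int))) (S : List Int)
    (l : List (Int × Int)) (hs : s.Nodup)
    (hsub : ∀ x ∈ s, x ∈ pvUniv S l) : s.length ≤ (pvUniv S l).length :=
  (List.subperm_of_subset hs hsub).length_le

-- A's loop computes exactly the reachable labelings (given enough fuel)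
theorem loopA_char (inverses : List (PySem.Dict Int Int)) (labeling : List (Int × Int)) :
    ∀ (fuel : Nat) (s : PySem.Set (List (Int × Int))), s.Nodup →
      (∀ x ∈ s, x ∈ pvUniv (pvSyms inverses labeling) labeling) →
      (∀ x ∈ s, pvReach inverses labeling x) → labeling ∈ s →
      (pvUniv (pvSyms inverses labeling) labeling).length < fuel + s.length →
      (pvLoopA inverses fuel s).Nodup ∧
        ∀ x, x ∈ pvLoopA inverses fuel s ↔ pvReach inverses labeling x := by
  intro fuel
  induction fuel with
  | zero =>
    intro s hnd hU _ _ hlen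
    have := length_le_of_subset_univ s (pvSyms inverses labeling) labeling hnd hU
    omega
  | succ fuel ih =>
    intro s hnd hU hR hseed hlen
    have hpass := pvPassA_eq inverses s
    set T := s.flatMap (fun l => inverses.map (fun m => pvStepB m l)) with hT
    have hmemT : ∀ x, x ∈ T ↔ ∃ l ∈ s, ∃ m ∈ inverses, x = pvStepB m l := by
      intro x
      simp [hT, List.mem_flatMap, eq_comm]
    have hmem' : ∀ x, x ∈ pvPassA inverses s ↔ x ∈ s ∨ x ∈ T := by
      intro x; rw [hpass]; exact mem_pvAddAll s T x
    have hnd' : (pvPassA inverses s).Nodup := by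
      rw [hpass]; exact nodup_pvAddAll s T hnd
    have hU' : ∀ x ∈ pvPassA inverses s, x ∈ pvUniv (pvSyms inverses labeling) labeling := by
      intro x hx
      rcases (hmem' x).mp hx with h | h
      · exact hU x h
      · obtain ⟨l, hl, m, hm, rfl⟩ := (hmemT x).mp h
        exact step_mem_pvUniv inverses labeling m hm l (hU l hl)
    have hR' : ∀ x ∈ pvPassA inverses s, pvReach inverses labeling x := by
      intro x hx
      rcases (hmem' x).mp hx with h | h
      · exact hR x h
      · obtain ⟨l, hl, m, hm, rfl⟩ := (hmemT x).mp h
        exact pvReach.step (hR l hl) hm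
    have hseed' : labeling ∈ pvPassA inverses s := (hmem' labeling).mpr (Or.inl hseed)
    simp only [pvLoopA]
    by_cases hgrow : s.length < (pvPassA inverses s).length
    · rw [if_pos hgrow]
      exact ih (pvPassA inverses s) hnd' hU' hR' hseed' (by omega)
    · rw [if_neg hgrow]
      have heq : pvPassA inverses s = s := by
        rw [hpass]
        exact pvAddAll_eq_of_length s T (by rw [← hpass]; omega)
      have hclosed : ∀ l ∈ s, ∀ m ∈ inverses, pvStepB m l ∈ s := by
        intro l hl m hm
        have : pvStepB m l ∈ T := (hmemT _).mpr ⟨l, hl, m, hm, rfl⟩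
        have := (hmem' (pvStepB m l)).mpr (Or.inr this)
        rwa [heq] at this
      rw [heq]
      refine ⟨hnd, fun x => ⟨hR x, fun hr => ?_⟩⟩
      induction hr with
      | seed => exact hseed
      | step h hm ihr => exact hclosed _ ihr _ hm

-- expanding one frontier vector appends the same fresh successors to seen and to nxt
theorem altPush_char (vec : List Int) :
    ∀ (ms : List (PySem.Dict Int Int)) (seen : PySem.Set (List Int))
      (acc : List (List Int)), seen.Nodup →
      ∃ new : List (List Int),
        ms.foldl (altPush vec) (seen, acc) = (seen ++ new, acc ++ new) ∧
        (seen ++ new).Nodup ∧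
        (∀ x ∈ new, x ∉ seen ∧ ∃ m ∈ ms, x = altStep m vec) ∧
        (∀ m ∈ ms, altStep m vec ∈ seen ++ new) := by
  intro ms
  induction ms with
  | nil =>
    intro seen acc hnd
    exact ⟨[], by simp, by simpa, by simp, by simp⟩
  | cons m rest ih =>
    intro seen acc hnd
    by_cases hc : altStep m vec ∈ seen
    · obtain ⟨new, h1, h2, h3, h4⟩ := ih seen acc hnd
      refine ⟨new, ?_, h2, ?_, ?_⟩
      · calc (m :: rest).foldl (altPush vec) (seen, acc)
            = rest.foldl (altPush vec) (seen, acc) := by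
              simp [altPush, List.foldl_cons, hc]
          _ = (seen ++ new, acc ++ new) := h1
      · exact fun x hx => ⟨(h3 x hx).1, by
          obtain ⟨_, m', hm', he⟩ := h3 x hx
          exact ⟨m', List.mem_cons_of_mem m hm', he⟩⟩
      · intro m' hm'
        rcases List.mem_cons.mp hm' with rfl | hm'
        · exact List.mem_append_left _ hc
        · exact h4 m' hm'
    · have hni : altStep m vec ∉ seen := hc
      have hnd1 : (seen ++ [altStep m vec]).Nodup := by
        rw [List.nodup_append]
        refine ⟨hnd, List.nodup_singleton _, fun a ha b hb => ?_⟩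
        rcases List.mem_singleton.mp hb with rfl
        exact fun heq => hni (heq ▸ ha)
      obtain ⟨new, h1, h2, h3, h4⟩ := ih (seen ++ [altStep m vec]) (acc ++ [altStep m vec]) hnd1
      refine ⟨altStep m vec :: new, ?_, ?_, ?_, ?_⟩
      · have hstep : (m :: rest).foldl (altPush vec) (seen, acc) =
            rest.foldl (altPush vec) (seen ++ [altStep m vec], acc ++ [altStep m vec]) := by
          simp [altPush, List.foldl_cons, hni, PySem.Set.add]
        rw [hstep, h1]
        simp
      · simpa using h2
      · intro x hx
        rcases List.mem_cons.mp hx with rfl | hx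
        · exact ⟨hni, m, by simp, rfl⟩
        · obtain ⟨hn, m', hm', he⟩ := h3 x hx
          refine ⟨fun h => hn (List.mem_append_left _ h), m', List.mem_cons_of_mem m hm', he⟩
      · intro m' hm'
        rcases List.mem_cons.mp hm' with rfl | hm'
        · simp
        · have := h4 m' hm'
          simpa using this

-- one BFS round appends exactly the fresh successors of the frontier
theorem altRound_char (inverses : List (PySem.Dict Int Int)) :
    ∀ (frontier : List (List Int)) (seen : PySem.Set (List Int))
      (acc : List (List Int)), seen.Nodup →
      ∃ new : List (List Int),
        frontier.foldl (fun st vec => inverses.foldl (altPush vec) st) (seen, acc) =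
          (seen ++ new, acc ++ new) ∧
        (seen ++ new).Nodup ∧
        (∀ x ∈ new, x ∉ seen ∧ ∃ vec ∈ frontier, ∃ m ∈ inverses, x = altStep m vec) ∧
        (∀ vec ∈ frontier, ∀ m ∈ inverses, altStep m vec ∈ seen ++ new) := by
  intro frontier
  induction frontier with
  | nil =>
    intro seen acc hnd
    exact ⟨[], by simp, by simpa, by simp, by simp⟩
  | cons vec rest ih =>
    intro seen acc hnd
    obtain ⟨n1, h1, hnd1, h3, h4⟩ := altPush_char vec inverses seen acc hnd
    obtain ⟨n2, g1, gnd, g3, g4⟩ := ih (seen ++ n1) (acc ++ n1) hnd1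
    refine ⟨n1 ++ n2, ?_, by simpa using gnd, ?_, ?_⟩
    · simp only [List.foldl_cons, h1, g1, List.append_assoc]
    · intro x hx
      rcases List.mem_append.mp hx with h | h
      · obtain ⟨hn, m, hm, he⟩ := h3 x h
        exact ⟨hn, vec, by simp, m, hm, he⟩
      · obtain ⟨hn, v', hv', m, hm, he⟩ := g3 x h
        exact ⟨fun hs => hn (List.mem_append_left _ hs), v', List.mem_cons_of_mem _ hv', m, hm, he⟩
    · intro v' hv' m hm
      rcases List.mem_cons.mp hv' with rfl | hv'
      · have h := h4 m hm
        rw [← List.append_assoc]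
        exact List.mem_append_left _ h
      · have := g4 v' hv' m hm
        simpa [List.append_assoc] using this

-- the universe of symbol vectors over S of a given length
def vUniv (S : List Int) : Nat → List (List Int)
  | 0 => [[]]
  | n+1 => (S ×ˢ vUniv S n).map (fun p => p.1 :: p.2)

theorem mem_vUniv (S : List Int) (n : Nat) (v : List Int) :
    v ∈ vUniv S n ↔ v.length = n ∧ ∀ f ∈ v, f ∈ S := by
  induction n generalizing v with
  | zero => cases v <;> simp [vUniv]
  | succ n ih =>
    cases v with
    | nil => simp [vUniv]
    | cons a t =>
      simp only [vUniv, List.mem_map]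
      constructor
      · rintro ⟨⟨x, r⟩, hm, heq⟩
        rw [List.mem_product] at hm
        cases heq
        obtain ⟨hl, hall⟩ := (ih r).mp hm.2
        refine ⟨by simp [hl], ?_⟩
        intro f hf
        rcases List.mem_cons.mp hf with rfl | hf
        · exact hm.1
        · exact hall f hf
      · rintro ⟨hl, hall⟩
        refine ⟨(a, t), List.mem_product.mpr ⟨hall a (by simp), (ih t).mpr ⟨by simpa using hl, fun f hf => hall f (by simp [hf])⟩⟩, rfl⟩

theorem length_vUniv (S : List Int) (n : Nat) : (vUniv S n).length = S.length ^ n := by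
  induction n with
  | zero => simp [vUniv]
  | succ n ih => simp [vUniv, List.length_product, ih, pow_succ]; ring

theorem vlength_le_of_subset_univ (s : List (List Int)) (S : List Int) (n : Nat)
    (hs : s.Nodup) (hsub : ∀ x ∈ s, x ∈ vUniv S n) : s.length ≤ (vUniv S n).length :=
  (List.subperm_of_subset hs hsub).length_le

-- altStep keeps a vector inside the universe
theorem altStep_mem_vUniv (inverses : List (PySem.Dict Int Int)) (labeling : List (Int × Int))
    (n : Nat) (m : PySem.Dict Int Int) (hm : m ∈ inverses) (v : List Int)
    (hv : v ∈ vUniv (pvSyms inverses labeling) n) :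
    altStep m v ∈ vUniv (pvSyms inverses labeling) n := by
  rw [mem_vUniv] at hv ⊢
  obtain ⟨hl, hall⟩ := hv
  refine ⟨by simp [altStep, hl], ?_⟩
  intro f hf
  rw [altStep, List.mem_map] at hf
  obtain ⟨g, hg, rfl⟩ := hf
  exact getD_mem_pvSyms inverses labeling m hm g (hall g hg)

-- B's BFS computes exactly the reachable vectors (given enough fuel)
theorem altLoop_char (inverses : List (PySem.Dict Int Int)) (labeling : List (Int × Int))
    (seed : List Int) :
    ∀ (fuel : Nat) (seen : PySem.Set (List Int)) (frontier : List (List Int)),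
      seen.Nodup →
      (∀ x ∈ seen, x ∈ vUniv (pvSyms inverses labeling) labeling.length) →
      (∀ x ∈ seen, vReach inverses seed x) → seed ∈ seen →
      (∀ x ∈ frontier, x ∈ seen) →
      (∀ v ∈ seen, v ∉ frontier → ∀ m ∈ inverses, altStep m v ∈ seen) →
      (vUniv (pvSyms inverses labeling) labeling.length).length + frontier.length <
        fuel + seen.length →
      (altLoop inverses fuel seen frontier).Nodup ∧
        ∀ x, x ∈ altLoop inverses fuel seen frontier ↔ vReach inverses seed x := by
  intro fuel
  induction fuel with
  | zero =>
    intro seen frontier hnd hU _ _ _ _ hlen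
    have := vlength_le_of_subset_univ seen (pvSyms inverses labeling) labeling.length hnd hU
    omega
  | succ fuel ih =>
    intro seen frontier hnd hU hR hseed hsub hcl hlen
    cases frontier with
    | nil =>
      simp only [altLoop, List.isEmpty_nil, if_pos]
      refine ⟨hnd, fun x => ⟨hR x, fun hr => ?_⟩⟩
      induction hr with
      | seed => exact hseed
      | step h hm ihr => exact hcl _ ihr (by simp) _ hm
    | cons v0 rest =>
      obtain ⟨new, h1, h2, h3, h4⟩ := altRound_char inverses (v0 :: rest) seen [] hnd
      have hrnd : altRound inverses (v0 :: rest) seen = (seen ++ new, new) := by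
        rw [altRound, h1]; simp
      simp only [altLoop, List.isEmpty_cons, hrnd]
      refine ih (seen ++ new) new h2 ?_ ?_ ?_ ?_ ?_ ?_
      · intro x hx
        rcases List.mem_append.mp hx with h | h
        · exact hU x h
        · obtain ⟨_, vec, hvec, m, hm, rfl⟩ := h3 x h
          exact altStep_mem_vUniv inverses labeling _ m hm vec (hU vec (hsub vec hvec))
      · intro x hx
        rcases List.mem_append.mp hx with h | h
        · exact hR x h
        · obtain ⟨_, vec, hvec, m, hm, rfl⟩ := h3 x h
          exact vReach.step (hR vec (hsub vec hvec)) hm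
      · exact List.mem_append_left _ hseed
      · exact fun x hx => List.mem_append_right _ hx
      · intro v hv hnf m hm
        rcases List.mem_append.mp hv with h | h
        · by_cases hvf : v ∈ v0 :: rest
          · exact h4 v hvf m hm
          · exact List.mem_append_left _ (hcl v h hvf m hm)
        · exact absurd h hnf
      · have hnewlen : (seen ++ new).length = seen.length + new.length := List.length_append
        simp only [List.length_cons] at hlen
        omega

-- stepping a zipped labeling is zipping the stepped vector
theorem pvStepB_zip (m : PySem.Dict Int Int) (v : List Int) (s : List Int) :
    pvStepB m (v.zip s) = (altStep m v).zip s := by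
  induction v generalizing s with
  | nil => simp [pvStepB, altStep]
  | cons a t ih =>
    cases s with
    | nil => simp [pvStepB, altStep]
    | cons b u =>
      simp only [List.zip_cons_cons, pvStepB, altStep, List.map_cons] at *
      exact congrArg _ (by simpa [pvStepB, altStep] using ih u)

theorem zip_fst_snd (l : List (Int × Int)) :
    (l.map (fun ft => ft.1)).zip (l.map (fun ft => ft.2)) = l := by
  induction l with
  | nil => rfl
  | cons a t ih => simp [ih]

-- reachable labelings are exactly zipped reachable vectors
theorem pvReach_iff_vReach (inverses : List (PySem.Dict Int Int)) (labeling : List (Int × Int))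
    (x : List (Int × Int)) :
    pvReach inverses labeling x ↔
      ∃ v, vReach inverses (labeling.map (fun ft => ft.1)) v ∧
        x = v.zip (labeling.map (fun ft => ft.2)) := by
  constructor
  · intro h
    induction h with
    | seed => exact ⟨labeling.map (fun ft => ft.1), vReach.seed, (zip_fst_snd labeling).symm⟩
    | step h hm ihr =>
      obtain ⟨v, hv, rfl⟩ := ihr
      exact ⟨altStep _ v, vReach.step hv hm, pvStepB_zip _ v _⟩
  · rintro ⟨v, hv, rfl⟩
    induction hv with
    | seed =>
      rw [zip_fst_snd labeling]
      exact pvReach.seed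
    | step h hm ihr => exact (pvStepB_zip _ _ _) ▸ pvReach.step ihr hm

-- reachable vectors all have the seed's length
theorem vReach_length (inverses : List (PySem.Dict Int Int)) (seed v : List Int)
    (h : vReach inverses seed v) : v.length = seed.length := by
  induction h with
  | seed => rfl
  | step _ _ ihr => simpa [altStep]

-- the sort in the ports elaborates the core `LT (List Int)` instance; it is the order of the
-- Mathlib linear order, which the PySem sorting lemmas are stated for
theorem pv_sorted_congr (xs : List (List (Int × Int))) (k : List (Int × Int) → List Int) :
    PySem.List.sorted xs k =
      @PySem.List.sorted _ _ List.instLinearOrder.toLT LinearOrder.toDecidableLT xs k false := by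
  congr 1

-- the two flattening keys agree
theorem altKey_eq_pvKey : altKey = pvKey := by
  funext l
  induction l with
  | nil => rfl
  | cons a t ih => simp [altKey, pvKey] at *; exact ih

-- the flattening key is injective, so sorting by it is determined by the multiset of elements
theorem pvKey_injective : Function.Injective pvKey := by
  intro l1 l2 h
  induction l1 generalizing l2 with
  | nil =>
    cases l2 with
    | nil => rfl
    | cons b u => simp [pvKey] at h
  | cons a t ih =>
    cases l2 with
    | nil => simp [pvKey] at h
    | cons b u =>
      simp only [pvKey, List.foldr_cons] at h
      injection h with h1 h'
      injection h' with h2 h3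
      have ht : t = u := ih (show pvKey t = pvKey u from h3)
      subst ht
      obtain ⟨a1, a2⟩ := a
      obtain ⟨b1, b2⟩ := b
      simp only at h1 h2
      simp [h1, h2]

-- ===== VERDICT (by name: the statement is the Claim_ definition above) =====
theorem find_closure_spec : Claim_equal_find_closure := by
  intro basis labeling _
  show find_closure basis labeling = find_closure_alt basis labeling
  simp only [find_closure, find_closure_alt]
  set inverses := basis.map pvInvert with hinv
  set start := labeling.map (fun ft => ft.1) with hstart
  set seconds := labeling.map (fun ft => ft.2) with hsec
  have hlenU : (pvUniv (pvSyms inverses labeling) labeling).length =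
      (pvSyms inverses labeling).length ^ labeling.length := length_pvUniv _ _
  have hlenV : (vUniv (pvSyms inverses labeling) labeling.length).length =
      (pvSyms inverses labeling).length ^ labeling.length := length_vUniv _ _
  have hsl : start.length = labeling.length := by simp [hstart]
  have hfuelB : altFuel inverses start =
      (pvSyms inverses labeling).length ^ labeling.length + 1 := by
    simp [altFuel, pvSyms, hstart]
  have hinitUA : ∀ x ∈ ([labeling] : List (List (Int × Int))),
      x ∈ pvUniv (pvSyms inverses labeling) labeling := by
    intro x hx
    rcases List.mem_singleton.mp hx with rfl
    exact seed_mem_pvUniv _ _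
  have hinitRA : ∀ x ∈ ([labeling] : List (List (Int × Int))),
      pvReach inverses labeling x := by
    intro x hx
    rcases List.mem_singleton.mp hx with rfl
    exact pvReach.seed
  have hinitUB : ∀ x ∈ ([start] : List (List Int)),
      x ∈ vUniv (pvSyms inverses labeling) labeling.length := by
    intro x hx
    rcases List.mem_singleton.mp hx with rfl
    rw [mem_vUniv]
    refine ⟨hsl, fun f hf => ?_⟩
    rw [pvSyms, List.mem_dedup]
    exact List.mem_append_left _ (by simpa [hstart] using hf)
  have hinitRB : ∀ x ∈ ([start] : List (List Int)), vReach inverses start x := by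
    intro x hx
    rcases List.mem_singleton.mp hx with rfl
    exact vReach.seed
  obtain ⟨hndA, hmemA⟩ := loopA_char inverses labeling
    (pvFuel inverses labeling) [labeling]
    (by simp) hinitUA hinitRA (by simp) (by rw [hlenU]; simp [pvFuel])
  obtain ⟨hndB, hmemB⟩ := altLoop_char inverses labeling start
    (altFuel inverses start) [start] [start]
    (by simp) hinitUB hinitRB (by simp) (fun x hx => hx)
    (by intro v hv hnv; exact absurd hv hnv)
    (by rw [hlenV, hfuelB]; simp)
  have h0A : (PySem.Set.ofList [labeling] : PySem.Set (List (Int × Int))) = [labeling] := rfl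
  have h0B : (PySem.Set.ofList [start] : PySem.Set (List Int)) = [start] := rfl
  rw [h0A, h0B, altKey_eq_pvKey, pv_sorted_congr _ pvKey, pv_sorted_congr _ pvKey]
  -- the mapped BFS result has no duplicates and the same members as A's fixpoint set
  set sB := altLoop inverses (altFuel inverses start) [start] [start] with hsB
  have hlenv : ∀ v ∈ sB, v.length = seconds.length := by
    intro v hv
    have := vReach_length inverses start v ((hmemB v).mp hv)
    simp [hsec, this, hsl]
  have hndB' : (sB.map (fun vec => vec.zip seconds)).Nodup := by
    refine List.Nodup.map_on ?_ hndB
    intro x hx y hy hxy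
    have hx' := hlenv x hx
    have hy' := hlenv y hy
    have := congrArg (List.map Prod.fst) hxy
    rwa [List.map_fst_zip (le_of_eq hx'), List.map_fst_zip (le_of_eq hy')] at this
  have hmem : ∀ x, x ∈ sB.map (fun vec => vec.zip seconds) ↔ pvReach inverses labeling x := by
    intro x
    rw [List.mem_map, pvReach_iff_vReach]
    constructor
    · rintro ⟨v, hv, rfl⟩
      exact ⟨v, (hmemB v).mp hv, rfl⟩
    · rintro ⟨v, hv, rfl⟩
      exact ⟨v, (hmemB v).mpr hv, rfl⟩
  have hperm : (pvLoopA inverses (pvFuel inverses labeling) [labeling]).Perm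
      (sB.map (fun vec => vec.zip seconds)) :=
    (List.perm_ext_iff_of_nodup hndA hndB').mpr (fun x => (hmemA x).trans (hmem x).symm)
  refine PySem.List.eq_of_perm_of_pairwise_le_of_injective pvKey pvKey_injective ?_
    (PySem.List.sorted_pairwise _ pvKey) (PySem.List.sorted_pairwise _ pvKey)
  exact (@PySem.List.sorted_perm _ _ List.instLinearOrder.toLT LinearOrder.toDecidableLT
      _ pvKey false).trans
    (hperm.trans (@PySem.List.sorted_perm _ _ List.instLinearOrder.toLT
      LinearOrder.toDecidableLT _ pvKey false).symm)
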